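-- pv_equiv track=rewrite | github.com/salomeviana/ProyectoLogica2 | EntregaFinal.py | forma_clausal
-- ===== SOURCE A (Python) =====
-- def forma_clausal(formula):
--     # Crea una formula en su forma clausal dada una formula en forma normal conjuntiva
--     #Input: formula, formula como Tree en forma normal conjuntiva
--     #Output: Formula en su forma clausal
--     lista = []
--     count = 0
--     while len(formula)>0:
--         if count == len(formula) or formula[count] == "Y":
--             lista1 = formula[:count]
--             lista2 = []
--             while len(lista1)>0:
--                 caracter = lista1[0]
--                 if caracter in ["O", "(" ,")"]:
--                     lista1 = lista1[1:]
--                 elif caracter == "-":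
--                     literal = caracter + lista1[1]
--                     lista2.append(literal)
--                     lista1 = lista1[2:]
--                 else:
--                     lista2.append(caracter)
--                     lista1 = lista1[1:]
--             lista.append(lista2)
--
--             formula = formula[count+1:]
--             count = 0
--         else:
--             count +=1
--     string = ""
--     listaFinal = []
--     for i in lista:
--         for j in i:
--             string += j
--         listaFinal.append(string)
--         string = ""
--     return listaFinal
-- ===== SOURCE B (Python) =====
-- def forma_clausal(formula):
--     segments = formula.split("Y")
--     if segments[-1] == "":
--         segments.pop()
--     clauses = []
--     for seg in segments:
--         clause = ""
--         i = 0
--         while i < len(seg):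
--             c = seg[i]
--             if c in "O()":
--                 i += 1
--             elif c == "-":
--                 clause += c + seg[i + 1]
--                 i += 2
--             else:
--                 clause += c
--                 i += 1
--         clauses.append(clause)
--     return clauses
-- ===== Notes on version B (the rewrite author's own statement) =====
-- stated objective: simpler
-- what changed: A re-scans the formula with an index-and-slice outer loop, collects each clause as a list of literal strings, and joins them in a separate final pass; B splits the formula once at the conjunction separator character (dropping only the trailing empty segment, as A does) and builds each clause string directly in a single left-to-right pass, with no intermediate list-of-lists and no join pass.
-- outside the precondition, e.g. on forma_clausal('-'): A raises IndexError, B raises IndexError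
import Mathlib
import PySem

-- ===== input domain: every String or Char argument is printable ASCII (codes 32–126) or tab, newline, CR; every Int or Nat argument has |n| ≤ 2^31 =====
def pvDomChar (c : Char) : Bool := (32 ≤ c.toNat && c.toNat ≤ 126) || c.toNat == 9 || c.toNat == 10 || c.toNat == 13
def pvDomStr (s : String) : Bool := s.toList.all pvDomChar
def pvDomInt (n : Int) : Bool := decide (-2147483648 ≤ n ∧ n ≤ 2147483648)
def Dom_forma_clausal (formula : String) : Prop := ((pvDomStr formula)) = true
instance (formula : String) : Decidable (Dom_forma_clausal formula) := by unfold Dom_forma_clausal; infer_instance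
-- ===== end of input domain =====

-- B replaces A's index-scanning outer loop + list-of-lists + join pass by one split on "Y"
-- and a single direct string-building pass per clause (objective: simpler).

-- ===== PORT A =====
-- A's inner while: consumes lista1 front-first, collecting literal strings into lista2.
def pvAClause (lista1 : List Char) (lista2 : List (List Char)) : List (List Char) :=
  match lista1 with
  | [] => lista2
  | c :: rest =>
    if c = 'O' ∨ c = '(' ∨ c = ')' then pvAClause rest lista2
    else if c = '-' then
      match rest with
      | d :: rest' => pvAClause rest' (lista2 ++ [[c, d]])
      | [] => lista2   -- Python raises IndexError here (excluded by Pre_)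
    else pvAClause rest (lista2 ++ [[c]])

-- A's outer while over formula with scanning index count.
def pvAOuter (formula : List Char) (count : Nat) (lista : List (List (List Char))) :
    List (List (List Char)) :=
  if 0 < formula.length then
    if count = formula.length ∨ formula[count]? = some 'Y' then
      pvAOuter (formula.drop (count + 1)) 0 (lista ++ [pvAClause (formula.take count) []])
    else if _h : count < formula.length then
      pvAOuter formula (count + 1) lista
    else lista  -- unreachable: Python's count never exceeds len(formula); guard for totality
  else lista
termination_by (formula.length, formula.length - count)
decreasing_by
  · simp only [List.length_drop]
    exact Prod.Lex.left _ _ (by omega)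
  · exact Prod.Lex.right _ (by omega)

def forma_clausal (formula : String) : List String :=
  (pvAOuter formula.toList 0 []).map
    (fun i => String.ofList (i.foldl (fun string j => string ++ j) []))

-- ===== PORT B =====
-- port of Source B's formula.split("Y") (single-character separator)
def pvSplitY (cs : List Char) : List (List Char) :=
  match cs with
  | [] => [[]]
  | c :: rest =>
    if c = 'Y' then [] :: pvSplitY rest
    else
      match pvSplitY rest with
      | s :: ss => (c :: s) :: ss
      | [] => [[c]]   -- unreachable: pvSplitY never returns []

-- Source B's per-segment while loop building the clause string left to right.
def pvBClause (seg : List Char) (clause : List Char) : List Char :=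
  match seg with
  | [] => clause
  | c :: rest =>
    if c = 'O' ∨ c = '(' ∨ c = ')' then pvBClause rest clause
    else if c = '-' then
      match rest with
      | d :: rest' => pvBClause rest' (clause ++ [c, d])
      | [] => clause   -- Python raises IndexError here (excluded by Pre_)
    else pvBClause rest (clause ++ [c])

def forma_clausal_alt (formula : String) : List String :=
  let segments := pvSplitY formula.toList
  let segments := if segments.getLast? = some [] then segments.dropLast else segments
  segments.map (fun seg => String.ofList (pvBClause seg []))

-- ===== PRECONDITION & SPEC =====
-- Pre_ excludes exactly the inputs on which Python A raises IndexError: a 'Y'-separated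
-- segment ending in an odd-length run of '-' makes A read lista1[1] past the end.
def Pre_forma_clausal (formula : String) : Prop :=
  ∀ s ∈ formula.toList.splitOn 'Y', (s.reverse.takeWhile (· = '-')).length % 2 = 0
instance (formula : String) : Decidable (Pre_forma_clausal formula) := by
  unfold Pre_forma_clausal; infer_instance
def pvWitness_forma_clausal : String := "(pO-q)Y(rOs)"

def Spec_forma_clausal (formula : String) (out : List String) : Prop := out = forma_clausal_alt formula
instance (formula : String) (out : List String) : Decidable (Spec_forma_clausal formula out) := by unfold Spec_forma_clausal; infer_instance

-- ===== CLAIM (what is proved, stated in full; the proofs are below) =====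
def Claim_equal_forma_clausal : Prop := ∀ (formula : String), Dom_forma_clausal formula → Pre_forma_clausal formula → Spec_forma_clausal formula (forma_clausal formula)

-- ===== LEMMAS AND PROOFS =====

-- A = B on ALL strings (the Lean ports agree even on the inputs Pre_ excludes, since both
-- ports drop a dangling '-'); the proof therefore does not need Pre_ beyond the statement.

-- the semantic reference splitter: 'Y'-segments of cs, with a trailing empty segment dropped
def pvMySplit (cs : List Char) : List (List Char) :=
  match cs with
  | [] => []
  | c :: rest =>
    if c = 'Y' then [] :: pvMySplit rest
    else
      match pvMySplit rest with
      | s :: ss => (c :: s) :: ss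
      | [] => [[c]]

theorem pvAClause_acc : ∀ (s : List Char) (a : List (List Char)),
    pvAClause s a = a ++ pvAClause s []
  | [], a => by simp [pvAClause]
  | c :: rest, a => by
    cases rest with
    | nil =>
      by_cases h : c = 'O' ∨ c = '(' ∨ c = ')'
      · simp [pvAClause, h]
      · by_cases h2 : c = '-' <;> simp [pvAClause, h, h2]
    | cons d rest' =>
      by_cases h : c = 'O' ∨ c = '(' ∨ c = ')'
      · simp only [pvAClause, if_pos h]
        exact pvAClause_acc (d :: rest') a
      · by_cases h2 : c = '-'
        · simp only [pvAClause, if_neg h, if_pos h2]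
          rw [pvAClause_acc rest' (a ++ [[c, d]]), pvAClause_acc rest' ([] ++ [[c, d]])]
          simp
        · simp only [pvAClause, if_neg h, if_neg h2]
          rw [pvAClause_acc (d :: rest') (a ++ [[c]]), pvAClause_acc (d :: rest') ([] ++ [[c]])]
          simp

theorem pvBClause_acc : ∀ (s : List Char) (a : List Char),
    pvBClause s a = a ++ pvBClause s []
  | [], a => by simp [pvBClause]
  | c :: rest, a => by
    cases rest with
    | nil =>
      by_cases h : c = 'O' ∨ c = '(' ∨ c = ')'
      · simp [pvBClause, h]
      · by_cases h2 : c = '-' <;> simp [pvBClause, h, h2]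
    | cons d rest' =>
      by_cases h : c = 'O' ∨ c = '(' ∨ c = ')'
      · simp only [pvBClause, if_pos h]
        exact pvBClause_acc (d :: rest') a
      · by_cases h2 : c = '-'
        · simp only [pvBClause, if_neg h, if_pos h2]
          rw [pvBClause_acc rest' (a ++ [c, d]), pvBClause_acc rest' ([] ++ [c, d])]
          simp
        · simp only [pvBClause, if_neg h, if_neg h2]
          rw [pvBClause_acc (d :: rest') (a ++ [c]), pvBClause_acc (d :: rest') ([] ++ [c])]
          simp

theorem pvBClause_eq_flatten : ∀ (s : List Char),
    pvBClause s [] = (pvAClause s []).flatten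
  | [] => by simp [pvBClause, pvAClause]
  | c :: rest => by
    cases rest with
    | nil =>
      by_cases h : c = 'O' ∨ c = '(' ∨ c = ')'
      · simp [pvBClause, pvAClause, h]
      · by_cases h2 : c = '-' <;> simp [pvBClause, pvAClause, h, h2]
    | cons d rest' =>
      by_cases h : c = 'O' ∨ c = '(' ∨ c = ')'
      · simp only [pvBClause, pvAClause, if_pos h]
        exact pvBClause_eq_flatten (d :: rest')
      · by_cases h2 : c = '-'
        · simp only [pvBClause, pvAClause, if_neg h, if_pos h2]
          rw [pvBClause_acc rest' ([] ++ [c, d]), pvAClause_acc rest' ([] ++ [[c, d]]),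
            pvBClause_eq_flatten rest']
          simp
        · simp only [pvBClause, pvAClause, if_neg h, if_neg h2]
          rw [pvBClause_acc (d :: rest') ([] ++ [c]), pvAClause_acc (d :: rest') ([] ++ [[c]]),
            pvBClause_eq_flatten (d :: rest')]
          simp

theorem pvFoldl_append (l : List (List Char)) (init : List Char) :
    l.foldl (fun string j => string ++ j) init = init ++ l.flatten := by
  induction l generalizing init with
  | nil => simp
  | cons x xs ih => simp [List.foldl_cons, ih]

theorem pvSplitY_ne_nil (cs : List Char) : pvSplitY cs ≠ [] := by
  induction cs with
  | nil => simp [pvSplitY]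
  | cons c rest ih =>
    rw [pvSplitY]
    split
    · simp
    · cases h : pvSplitY rest <;> simp

theorem pvMySplit_eq_dropIfLastEmpty : ∀ (cs : List Char),
    pvMySplit cs =
      (if (pvSplitY cs).getLast? = some [] then (pvSplitY cs).dropLast else pvSplitY cs) := by
  intro cs
  induction cs with
  | nil => simp [pvMySplit, pvSplitY]
  | cons c rest ih =>
    obtain ⟨s, ss, hss⟩ : ∃ s ss, pvSplitY rest = s :: ss := by
      cases h : pvSplitY rest with
      | nil => exact absurd h (pvSplitY_ne_nil rest)
      | cons a b => exact ⟨a, b, rfl⟩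
    by_cases hY : c = 'Y'
    · rw [pvMySplit, pvSplitY]
      simp only [hY, if_true, ih, hss]
      cases ss with
      | nil =>
        by_cases hs : s = [] <;> simp [hs]
      | cons t ts =>
        by_cases hL : (s :: t :: ts).getLast? = some ([] : List Char)
        · rw [if_pos hL, if_pos (by simpa using hL)]
          simp
        · rw [if_neg hL, if_neg (by simpa using hL)]
    · rw [pvMySplit, pvSplitY]
      simp only [hY, if_false, ih, hss]
      cases ss with
      | nil =>
        by_cases hs : s = [] <;> simp [hs]
      | cons t ts =>
        by_cases hL : (t :: ts).getLast? = some ([] : List Char)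
        · rw [if_pos (by simpa using hL)]
          simp only [List.dropLast_cons₂]
          rw [if_pos (by simpa using hL)]
        · rw [if_neg (by simpa using hL), if_neg (by simpa using hL)]

theorem pvMySplit_unfold : ∀ (cs : List Char), cs ≠ [] →
    pvMySplit cs =
      cs.takeWhile (· ≠ 'Y') :: pvMySplit ((cs.dropWhile (· ≠ 'Y')).tail) := by
  intro cs
  induction cs with
  | nil => intro h; exact absurd rfl h
  | cons c rest ih =>
    intro _
    by_cases hY : c = 'Y'
    · simp [pvMySplit, List.dropWhile_cons, hY]
    · cases rest with
      | nil => simp [pvMySplit, hY]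
      | cons r rs =>
        rw [pvMySplit]
        simp only [hY, if_false, ih (by simp)]
        simp [List.takeWhile_cons, List.dropWhile_cons, hY]

theorem pvTakeWhile_eq_take : ∀ (cs : List Char) (count : Nat), count ≤ cs.length →
    (∀ c ∈ cs.take count, c ≠ 'Y') → cs[count]? = some 'Y' →
    cs.takeWhile (· ≠ 'Y') = cs.take count ∧ cs.dropWhile (· ≠ 'Y') = cs.drop count := by
  intro cs
  induction cs with
  | nil => intro count _ _ hY; simp at hY
  | cons c rest ih =>
    intro count hle hNoY hY
    cases count with
    | zero =>
      simp only [List.getElem?_cons_zero, Option.some.injEq] at hY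
      subst hY
      simp [List.takeWhile_cons, List.dropWhile_cons]
    | succ n =>
      have hc : c ≠ 'Y' := hNoY c (by simp [List.take_succ_cons])
      have := ih n (by simpa using hle)
        (fun x hx => hNoY x (by simp [List.take_succ_cons, hx])) (by simpa using hY)
      simp only [ne_eq, decide_not] at this
      simp [List.takeWhile_cons, hc, this.1, this.2]

theorem pvAOuter_scan : ∀ (k : Nat) (cs : List Char) (count : Nat) lista,
    cs.length - count = k → count ≤ cs.length → (∀ c ∈ cs.take count, c ≠ 'Y') →
    0 < cs.length →
    pvAOuter cs count lista =
      pvAOuter ((cs.dropWhile (· ≠ 'Y')).tail) 0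
        (lista ++ [pvAClause (cs.takeWhile (· ≠ 'Y')) []]) := by
  intro k
  induction k using Nat.strong_induction_on with
  | _ k IH =>
    intro cs count lista hk hle hNoY hpos
    by_cases hstop : count = cs.length ∨ cs[count]? = some 'Y'
    · rw [pvAOuter, if_pos hpos, if_pos hstop]
      rcases hstop with hstop | hstop
      · have hNoYall : ∀ c ∈ cs, c ≠ 'Y' := by
          intro x hx
          exact hNoY x (by simpa [hstop, List.take_length] using hx)
        have htw : cs.takeWhile (· ≠ 'Y') = cs := by
          rw [List.takeWhile_eq_self_iff]
          intro a ha; simpa using hNoYall a ha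
        have hdw : cs.dropWhile (· ≠ 'Y') = [] := by
          rw [List.dropWhile_eq_nil_iff]
          intro a ha; simpa using hNoYall a ha
        rw [htw, hdw, hstop, List.take_length]
        have : cs.drop (cs.length + 1) = [] := by
          apply List.drop_eq_nil_of_le; omega
        rw [this]
        rfl
      · obtain ⟨hlt, -⟩ := List.getElem?_eq_some_iff.mp hstop
        obtain ⟨htw, hdw⟩ := pvTakeWhile_eq_take cs count hle hNoY hstop
        rw [htw, hdw]
        have : cs.drop count = 'Y' :: cs.drop (count + 1) := by
          rw [List.drop_eq_getElem_cons hlt]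
          congr 1
          have h2 := hstop
          rw [List.getElem?_eq_getElem hlt] at h2
          simpa using h2
        rw [this, List.tail_cons]
    · push_neg at hstop
      obtain ⟨hne, hnY⟩ := hstop
      have hlt : count < cs.length := by omega
      rw [pvAOuter, if_pos hpos, if_neg (by push_neg; exact ⟨hne, hnY⟩)]
      rw [dif_pos hlt]
      exact IH (k - 1) (by omega) cs (count + 1) lista (by omega) (by omega)
        (by
          intro x hx
          rw [List.take_add_one] at hx
          rcases List.mem_append.mp hx with hx | hx
          · exact hNoY x hx
          · rw [List.getElem?_eq_getElem hlt] at hx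
            simp only [Option.toList_some, List.mem_singleton] at hx
            subst hx
            intro hEq
            exact hnY (by rw [List.getElem?_eq_getElem hlt, hEq])) hpos

theorem pvAOuter_eq : ∀ (k : Nat) (cs : List Char) lista, cs.length ≤ k →
    pvAOuter cs 0 lista = lista ++ (pvMySplit cs).map (fun s => pvAClause s []) := by
  intro k
  induction k using Nat.strong_induction_on with
  | _ k IH =>
    intro cs lista hlen
    cases hcs : cs with
    | nil => rw [pvAOuter]; simp [pvMySplit]
    | cons c rest =>
      rw [← hcs]
      have hne : cs ≠ [] := by rw [hcs]; simp
      have hpos : 0 < cs.length := by rw [hcs]; simp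
      rw [pvAOuter_scan (cs.length - 0) cs 0 lista rfl (by omega) (by simp) hpos]
      have hlt : ((cs.dropWhile (· ≠ 'Y')).tail).length < cs.length := by
        have h1 := List.length_dropWhile_le (p := (· ≠ 'Y')) (l := cs)
        cases hd : cs.dropWhile (· ≠ 'Y') with
        | nil => simpa [hd] using hpos
        | cons x xs =>
          rw [hd] at h1
          simp only [List.tail_cons]
          simp at h1
          omega
      cases k with
      | zero => omega
      | succ k' =>
        rw [IH k' (by omega) _ _ (by omega)]
        rw [pvMySplit_unfold cs hne]
        simp

-- ===== VERDICT (by name: the statement is the Claim_ definition above) =====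
theorem forma_clausal_spec : Claim_equal_forma_clausal := by
  intro formula _ _
  unfold Spec_forma_clausal forma_clausal forma_clausal_alt
  rw [pvAOuter_eq formula.toList.length formula.toList [] le_rfl,
    pvMySplit_eq_dropIfLastEmpty]
  simp only [List.nil_append, List.map_map]
  apply List.map_congr_left
  intro s _
  simp only [Function.comp]
  rw [pvFoldl_append, List.nil_append, ← pvBClause_eq_flatten]
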